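-- pv_equiv track=rewrite | github.com/kayehMDA/CVM-colorBot | src/utils/mouse/ArduinoAPI.py | _split_axis
-- ===== SOURCE A (Python) =====
-- def _split_axis(delta: int):
--     remaining = int(delta)
--     chunks = []
--
--     while remaining > 127:
--         chunks.append(127)
--         remaining -= 127
--
--     while remaining < -127:
--         chunks.append(-127)
--         remaining += 127
--
--     chunks.append(remaining)
--     return chunks
-- ===== SOURCE B (Python) =====
-- def _split_axis(delta: int):
--     d = int(delta)
--     sign = 1 if d >= 0 else -1
--     q, r = divmod(abs(d), 127)
--     if r == 0 and q > 0:
--         return [sign * 127] * q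
--     return [sign * 127] * q + [sign * r]
-- ===== Notes on version B (the rewrite author's own statement) =====
-- stated objective: simpler
-- what changed: Replaces A's two subtract-127 while-loops with a closed-form divmod: q,r = divmod(abs(delta),127) and list multiplication, handling the exact-multiple case (last chunk 127, not 0) arithmetically.
import Mathlib
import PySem

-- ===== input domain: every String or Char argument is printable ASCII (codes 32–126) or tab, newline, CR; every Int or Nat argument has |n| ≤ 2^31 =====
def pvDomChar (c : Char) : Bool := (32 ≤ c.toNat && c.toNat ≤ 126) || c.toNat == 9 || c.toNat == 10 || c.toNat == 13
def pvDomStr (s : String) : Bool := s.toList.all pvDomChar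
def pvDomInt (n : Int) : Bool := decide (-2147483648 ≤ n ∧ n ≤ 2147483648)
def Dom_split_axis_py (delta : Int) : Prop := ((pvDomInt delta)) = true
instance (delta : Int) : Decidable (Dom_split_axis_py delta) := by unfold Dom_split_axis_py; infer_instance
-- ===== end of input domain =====

-- B replaces A's two subtract-127 while-loops with closed-form divmod arithmetic (objective: simpler).

-- ===== PORT A =====
-- 'while remaining > 127: chunks.append(127); remaining -= 127'
def pvLoopPos (r : Int) (c : List Int) : Int × List Int :=
  if r > 127 then pvLoopPos (r - 127) (c ++ [127]) else (r, c)
termination_by r.toNat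
decreasing_by omega

-- 'while remaining < -127: chunks.append(-127); remaining += 127'
def pvLoopNeg (r : Int) (c : List Int) : Int × List Int :=
  if r < -127 then pvLoopNeg (r + 127) (c ++ [-127]) else (r, c)
termination_by (-r).toNat
decreasing_by omega

def split_axis_py (delta : Int) : List Int :=
  let p := pvLoopPos delta []
  let n := pvLoopNeg p.1 p.2
  n.2 ++ [n.1]

-- ===== PORT B =====
def split_axis_py_alt (delta : Int) : List Int :=
  let sign : Int := if delta ≥ 0 then 1 else -1
  let a : Nat := delta.natAbs
  let q : Nat := a / 127
  let r : Nat := a % 127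
  if r = 0 ∧ 0 < q then List.replicate q (sign * 127)
  else List.replicate q (sign * 127) ++ [sign * (r : Int)]

-- ===== PRECONDITION & SPEC =====
def Spec_split_axis_py (delta : Int) (out : List Int) : Prop := out = split_axis_py_alt delta
instance (delta : Int) (out : List Int) : Decidable (Spec_split_axis_py delta out) := by unfold Spec_split_axis_py; infer_instance

-- ===== CLAIM (what is proved, stated in full; the proofs are below) =====
def Claim_equal_split_axis_py : Prop := ∀ (delta : Int), Dom_split_axis_py delta → Spec_split_axis_py delta (split_axis_py delta)

-- ===== LEMMAS AND PROOFS =====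

lemma pvLoopPos_eq (r : Int) (c : List Int) (hr : 0 ≤ r) :
    pvLoopPos r c =
      if r % 127 = 0 ∧ 0 < r / 127
      then (127, c ++ List.replicate (r / 127 - 1).toNat 127)
      else (r % 127, c ++ List.replicate (r / 127).toNat 127) := by
  induction r, c using pvLoopPos.induct with
  | case1 r c h ih =>
    rw [pvLoopPos, if_pos h, ih (by omega)]
    split_ifs with h1 h2 h2
    · have hn : ((r - 127) / 127 - 1).toNat + 1 = (r / 127 - 1).toNat := by omega
      simp [List.append_assoc, ← hn, List.replicate_succ]
    · exact absurd h2 (by omega)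
    · exact absurd h1 (by omega)
    · have hn : ((r - 127) / 127).toNat + 1 = (r / 127).toNat := by omega
      refine Prod.ext (by omega) ?_
      simp [List.append_assoc, ← hn, List.replicate_succ]
  | case2 r c h =>
    rw [pvLoopPos, if_neg h]
    split_ifs with h1
    · have h127 : r = 127 := by omega
      simp [h127]
    · refine Prod.ext (by omega) ?_
      have : (r / 127).toNat = 0 := by omega
      simp [this]

lemma pvLoopNeg_eq (r : Int) (c : List Int) (hr : r ≤ 0) :
    pvLoopNeg r c =
      if (-r) % 127 = 0 ∧ 0 < (-r) / 127
      then (-127, c ++ List.replicate ((-r) / 127 - 1).toNat (-127))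
      else (-((-r) % 127), c ++ List.replicate ((-r) / 127).toNat (-127)) := by
  induction r, c using pvLoopNeg.induct with
  | case1 r c h ih =>
    rw [pvLoopNeg, if_pos h, ih (by omega)]
    split_ifs with h1 h2 h2
    · have hn : ((-(r + 127)) / 127 - 1).toNat + 1 = ((-r) / 127 - 1).toNat := by omega
      simp [List.append_assoc, ← hn, List.replicate_succ]
    · exact absurd h2 (by omega)
    · exact absurd h1 (by omega)
    · have hn : ((-(r + 127)) / 127).toNat + 1 = ((-r) / 127).toNat := by omega
      refine Prod.ext (by omega) ?_
      simp [List.append_assoc, ← hn, List.replicate_succ]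
  | case2 r c h =>
    rw [pvLoopNeg, if_neg h]
    split_ifs with h1
    · have h127 : r = -127 := by omega
      simp [h127]
    · refine Prod.ext (by omega) ?_
      have : ((-r) / 127).toNat = 0 := by omega
      simp [this]

-- ===== VERDICT (by name: the statement is the Claim_ definition above) =====
theorem split_axis_py_spec : Claim_equal_split_axis_py := by
  intro delta _
  unfold Spec_split_axis_py split_axis_py split_axis_py_alt
  dsimp only
  by_cases hd : 0 ≤ delta
  · rw [pvLoopPos_eq delta [] hd]
    split_ifs with h1 h2 h2
    · -- exact positive multiple of 127: A's loop leaves final 127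
      rw [pvLoopNeg, if_neg (by omega)]
      have hq : (delta / 127 - 1).toNat + 1 = delta.natAbs / 127 := by omega
      simp [← hq, List.replicate_succ']
    · exact absurd h2 (by omega)
    · exact absurd h1 (by omega)
    · rw [pvLoopNeg, if_neg (by omega)]
      have hq : (delta / 127).toNat = delta.natAbs / 127 := by omega
      have hr : ((delta.natAbs % 127 : Nat) : Int) = delta % 127 := by omega
      simp [hq, hr]
  · rw [pvLoopPos, if_neg (by omega), pvLoopNeg_eq delta [] (by omega)]
    split_ifs with h1 h2 h2
    · have hq : ((-delta) / 127 - 1).toNat + 1 = delta.natAbs / 127 := by omega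
      simp [← hq, List.replicate_succ']
    · exact absurd h2 (by omega)
    · exact absurd h1 (by omega)
    · have hq : ((-delta) / 127).toNat = delta.natAbs / 127 := by omega
      have hr : -(((delta.natAbs % 127 : Nat) : Int)) = -((-delta) % 127) := by omega
      simp [hq, ← hr]
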